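-- pv_equiv track=rewrite | github.com/bempp/bempp-cl | bempp/api/utils/helpers.py | serialise_list_of_lists
-- ===== SOURCE A (Python) =====
-- def serialise_list_of_lists(array):
--     """
--     Serialise a list of lists (or other iterable).
--
--     Returns a tuple (new_array, index_ptr), such
--     that array[j] = new_array[index_ptr[j] : index_ptr[j + 1]]
--     """
--     new_list = []
--     index_ptr = [0]
--
--     count = 0
--     for sublist in array:
--         new_list.extend(sublist)
--         count += len(sublist)
--         index_ptr.append(count)
--     return new_list, index_ptr
-- ===== SOURCE B (Python) =====
-- def serialise_list_of_lists(array):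
--     """Divide-and-conquer: serialise each half, then merge by shifting the
--     right half's index pointers by the left half's total length."""
--     sublists = list(array)
--
--     def solve(lo, hi):
--         if lo == hi:
--             return [], [0]
--         if hi - lo == 1:
--             s = list(sublists[lo])
--             return s, [0, len(s)]
--         mid = (lo + hi) // 2
--         lf, lp = solve(lo, mid)
--         rf, rp = solve(mid, hi)
--         off = lp[-1]
--         return lf + rf, lp + [p + off for p in rp[1:]]
--
--     return solve(0, len(sublists))
-- ===== Notes on version B (the rewrite author's own statement) =====
-- stated objective: alternative
-- what changed: Replaces A's single left-to-right interleaved count-and-flatten loop with a divide-and-conquer recursion: each half is serialised independently and the results are merged by concatenating the flat parts and shifting the right half's index pointers by the left half's total length.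
import Mathlib
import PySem

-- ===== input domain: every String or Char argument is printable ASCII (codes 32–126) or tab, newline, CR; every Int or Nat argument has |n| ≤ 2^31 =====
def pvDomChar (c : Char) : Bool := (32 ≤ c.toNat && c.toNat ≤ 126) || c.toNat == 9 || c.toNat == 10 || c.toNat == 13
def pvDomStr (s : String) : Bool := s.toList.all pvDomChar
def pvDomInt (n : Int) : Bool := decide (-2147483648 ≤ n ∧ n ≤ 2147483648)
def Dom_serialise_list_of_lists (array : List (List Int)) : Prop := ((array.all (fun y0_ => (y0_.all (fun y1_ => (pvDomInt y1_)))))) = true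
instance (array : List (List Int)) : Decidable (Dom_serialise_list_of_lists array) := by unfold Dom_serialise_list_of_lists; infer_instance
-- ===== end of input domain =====

-- B serialises by divide-and-conquer (serialise each half, merge by shifting the right
-- half's pointers by the left total) instead of A's single interleaved loop; alternative algorithm.


-- ===== PORT A =====
-- A's single loop: extend new_list, add len to count, append count to index_ptr.
def serialise_list_of_lists (array : List (List Int)) : List Int × List Int :=
  let st := array.foldl
    (fun (st : List Int × List Int × Int) sublist =>
      let new_list := st.1 ++ sublist
      let count := st.2.2 + (sublist.length : Int)
      (new_list, st.2.1 ++ [count], count))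
    ([], [0], 0)
  (st.1, st.2.1)

-- ===== PORT B =====
-- solve(lo, hi) on the index range becomes recursion on the corresponding sublist;
-- lp[-1] is the last element of the (always nonempty) left pointer list.
def pvSolve : List (List Int) → List Int × List Int
  | [] => ([], [0])
  | [s] => (s, [0, (s.length : Int)])
  | a :: b :: t =>
      let arr := a :: b :: t
      let mid := arr.length / 2
      let (lf, lp) := pvSolve (arr.take mid)
      let (rf, rp) := pvSolve (arr.drop mid)
      let off := lp.getLastD 0
      (lf ++ rf, lp ++ rp.tail.map (· + off))
termination_by arr => arr.length
decreasing_by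
  · simp [List.length_take]; omega
  · simp [List.length_drop]; omega

def serialise_list_of_lists_alt (array : List (List Int)) : List Int × List Int :=
  pvSolve array

-- ===== PRECONDITION & SPEC =====
def Spec_serialise_list_of_lists (array : List (List Int)) (out : List Int × List Int) : Prop := out = serialise_list_of_lists_alt array
instance (array : List (List Int)) (out : List Int × List Int) : Decidable (Spec_serialise_list_of_lists array out) := by unfold Spec_serialise_list_of_lists; infer_instance

-- ===== CLAIM (what is proved, stated in full; the proofs are below) =====
def Claim_equal_serialise_list_of_lists : Prop := ∀ (array : List (List Int)), Dom_serialise_list_of_lists array → Spec_serialise_list_of_lists array (serialise_list_of_lists array)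

-- ===== LEMMAS AND PROOFS =====
-- running sums of a list of Ints, starting offset c (closed form shared by both proofs)
def pvAccum (c : Int) : List Int → List Int
  | [] => []
  | x :: xs => (c + x) :: pvAccum (c + x) xs

theorem pvAccum_append (c : Int) (xs ys : List Int) :
    pvAccum c (xs ++ ys) = pvAccum c xs ++ pvAccum (c + xs.sum) ys := by
  induction xs generalizing c with
  | nil => simp [pvAccum]
  | cons x xs ih => simp [pvAccum, ih, add_assoc]

theorem pvAccum_shift (c d : Int) (xs : List Int) :
    (pvAccum c xs).map (· + d) = pvAccum (c + d) xs := by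
  induction xs generalizing c with
  | nil => simp [pvAccum]
  | cons x xs ih =>
    simp only [pvAccum, List.map_cons, ih]
    ring_nf

theorem pvAccum_getLastD (c : Int) (xs : List Int) :
    (c :: pvAccum c xs).getLastD 0 = c + xs.sum := by
  induction xs generalizing c with
  | nil => simp [pvAccum]
  | cons x xs ih =>
    simp only [pvAccum, List.sum_cons]
    have := ih (c + x)
    simp only [List.getLastD_cons] at this ⊢
    rw [this]; ring

theorem pvSolve_eq (array : List (List Int)) :
    pvSolve array = (array.flatten, 0 :: pvAccum 0 (array.map (fun s => (s.length : Int)))) := by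
  induction array using pvSolve.induct with
  | case1 => simp [pvSolve, pvAccum]
  | case2 s => simp [pvSolve, pvAccum]
  | case3 a b t arr mid rf1 rp1 h1 rf2 rp2 h2 IHl IHr =>
    have hsplit : (a :: b :: t).take ((a :: b :: t).length / 2) ++
        (a :: b :: t).drop ((a :: b :: t).length / 2) = a :: b :: t :=
      List.take_append_drop _ _
    simp only [mid, arr, List.length_cons] at IHl IHr
    rw [pvSolve]
    simp only [List.length_cons, IHl, IHr, List.tail_cons,
      pvAccum_getLastD, pvAccum_shift]
    conv_rhs => rw [← hsplit]
    simp only [List.length_cons, List.flatten_append, List.map_append, pvAccum_append]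
    simp

theorem pv_fold_eq (array : List (List Int)) (nl ip : List Int) (c : Int) :
    array.foldl
      (fun (st : List Int × List Int × Int) sublist =>
        let new_list := st.1 ++ sublist
        let count := st.2.2 + (sublist.length : Int)
        (new_list, st.2.1 ++ [count], count))
      (nl, ip, c)
    = (nl ++ array.flatten, ip ++ pvAccum c (array.map (fun s => (s.length : Int))),
       c + ((array.map (fun s => (s.length : Int))).sum)) := by
  induction array generalizing nl ip c with
  | nil => simp [pvAccum]
  | cons h t ih =>
    simp only [List.foldl_cons, List.flatten_cons, List.map_cons, List.sum_cons, pvAccum]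
    rw [ih]
    simp [add_assoc]

-- ===== VERDICT (by name: the statement is the Claim_ definition above) =====
theorem serialise_list_of_lists_spec : Claim_equal_serialise_list_of_lists := by
  intro array _
  unfold Spec_serialise_list_of_lists serialise_list_of_lists serialise_list_of_lists_alt
  rw [pv_fold_eq, pvSolve_eq]
  simp
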